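-- pv_equiv track=rewrite | github.com/thepratholic/Competitive-Programming | CodeChef Contests/Starters 165/Poster_Perimeter.py | poster_perimeter
-- ===== SOURCE A (Python) =====
-- def poster_perimeter(N, M, K):
--     min_diff = float('inf')
--
--     for L in range(1, N + 1):
--         for W in range(1, M + 1):
--             perimeter = 2 * (L + W)
--             diff = abs(perimeter - K)
--             min_diff = min(min_diff, diff)
--
--     return min_diff
-- ===== SOURCE B (Python) =====
-- def poster_perimeter(N, M, K):
--     # Achievable perimeters are exactly the even numbers in [4, 2*(N+M)];
--     # clamp K into that interval and take the distance (parity gap inside).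
--     lo = 4
--     hi = 2 * (N + M)
--     if K <= lo:
--         return lo - K
--     if K >= hi:
--         return K - hi
--     return K % 2
-- ===== Notes on version B (the rewrite author's own statement) =====
-- stated objective: faster
-- what changed: Replaced the O(N*M) double loop over all (L,W) pairs with an O(1) closed form: the achievable perimeters are exactly the even integers in [4, 2*(N+M)], so the answer is the distance of K to that interval (K's parity inside it).
-- outside the precondition, e.g. on poster_perimeter(0, 3, 5): A returns inf, B returns 1
import Mathlib
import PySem

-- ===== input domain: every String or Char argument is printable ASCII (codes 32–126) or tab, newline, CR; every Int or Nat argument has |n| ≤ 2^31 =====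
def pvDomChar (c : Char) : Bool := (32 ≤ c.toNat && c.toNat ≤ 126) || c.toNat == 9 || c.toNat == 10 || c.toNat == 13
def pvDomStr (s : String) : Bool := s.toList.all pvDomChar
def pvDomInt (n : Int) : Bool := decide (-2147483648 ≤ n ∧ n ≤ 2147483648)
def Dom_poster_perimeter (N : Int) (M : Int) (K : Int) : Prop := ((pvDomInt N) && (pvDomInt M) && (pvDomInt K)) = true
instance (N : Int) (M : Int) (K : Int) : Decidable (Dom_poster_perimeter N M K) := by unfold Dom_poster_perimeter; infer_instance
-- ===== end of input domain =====

-- B replaces A's O(N*M) scan over all (L,W) pairs with an O(1) clamp of K into the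
-- interval of achievable perimeters [4, 2*(N+M)] (objective: faster).

-- ===== PORT A =====
-- Python's `min(min_diff, diff)` with min_diff starting at float('inf'):
-- modelled as Option Int (none = inf). Under Pre_ both loops run, so the final
-- accumulator is `some _`; the `.getD 0` default is never reached inside Pre_.
def pyMinOpt (o : Option Int) (x : Int) : Option Int :=
  some (match o with | none => x | some m => min m x)

def poster_perimeter (N : Int) (M : Int) (K : Int) : Int :=
  ((PySem.List.pyRange 1 (N+1) 1).foldl (fun acc L =>
    (PySem.List.pyRange 1 (M+1) 1).foldl (fun acc W =>
      pyMinOpt acc |2*(L+W) - K|) acc) none).getD 0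

-- ===== PORT B =====
def poster_perimeter_alt (N : Int) (M : Int) (K : Int) : Int :=
  let lo : Int := 4
  let hi : Int := 2*(N+M)
  if K ≤ lo then lo - K
  else if hi ≤ K then K - hi
  else PySem.Int.mod K 2

-- ===== PRECONDITION & SPEC =====
-- Pre_ excludes N < 1 or M < 1: there A's loops never run and it returns
-- float('inf'), a float rather than an integer.
def Pre_poster_perimeter (N : Int) (M : Int) (K : Int) : Prop := 1 ≤ N ∧ 1 ≤ M
instance (N : Int) (M : Int) (K : Int) : Decidable (Pre_poster_perimeter N M K) := by unfold Pre_poster_perimeter; infer_instance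

def pvWitness_poster_perimeter : Int × Int × Int := (3, 4, 10)

def Spec_poster_perimeter (N : Int) (M : Int) (K : Int) (out : Int) : Prop := out = poster_perimeter_alt N M K
instance (N : Int) (M : Int) (K : Int) (out : Int) : Decidable (Spec_poster_perimeter N M K out) := by unfold Spec_poster_perimeter; infer_instance

-- ===== CLAIM (what is proved, stated in full; the proofs are below) =====
def Claim_equal_poster_perimeter : Prop := ∀ (N : Int) (M : Int) (K : Int), Dom_poster_perimeter N M K → Pre_poster_perimeter N M K → Spec_poster_perimeter N M K (poster_perimeter N M K)

-- ===== LEMMAS AND PROOFS =====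

-- folding pyMinOpt from a `some` start is folding `min`
theorem foldl_pyMinOpt_some (xs : List Int) (a : Int) :
    xs.foldl pyMinOpt (some a) = some (xs.foldl min a) := by
  induction xs generalizing a with
  | nil => rfl
  | cons x xs ih => simp [List.foldl_cons, pyMinOpt, ih]

theorem foldl_min_le_init (xs : List Int) (a : Int) : xs.foldl min a ≤ a := by
  induction xs generalizing a with
  | nil => simp
  | cons x xs ih =>
    simp only [List.foldl_cons]
    exact le_trans (ih _) (min_le_left _ _)

theorem foldl_min_le_mem (xs : List Int) (a x : Int) (hx : x ∈ xs) :
    xs.foldl min a ≤ x := by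
  induction xs generalizing a with
  | nil => cases hx
  | cons y ys ih =>
    simp only [List.foldl_cons]
    rcases List.mem_cons.mp hx with rfl | h
    · exact le_trans (foldl_min_le_init _ _) (min_le_right _ _)
    · exact ih _ h
theorem foldl_min_mem (xs : List Int) (a : Int) :
    xs.foldl min a = a ∨ xs.foldl min a ∈ xs := by
  induction xs generalizing a with
  | nil => left; rfl
  | cons x xs ih =>
    simp only [List.foldl_cons]
    rcases ih (min a x) with h | h
    · rw [h]
      rcases min_cases a x with ⟨h', _⟩ | ⟨h', _⟩
      · left; exact h'
      · right; rw [h']; exact List.mem_cons_self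
    · right; exact List.mem_cons_of_mem _ h

-- the double loop is a fold of pyMinOpt over the flattened grid of diffs
theorem doubleLoop_eq_flat (M K : Int) (ls : List Int) (init : Option Int) :
    ls.foldl (fun acc L =>
      (PySem.List.pyRange 1 (M+1) 1).foldl (fun acc W => pyMinOpt acc |2*(L+W) - K|) acc) init
    = (ls.flatMap (fun L => (PySem.List.pyRange 1 (M+1) 1).map (fun W => |2*(L+W) - K|))).foldl pyMinOpt init := by
  induction ls generalizing init with
  | nil => rfl
  | cons L ls ih =>
    simp only [List.foldl_cons, List.flatMap_cons, List.foldl_append, List.foldl_map, ih]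

theorem poster_perimeter_eq_alt (N M K : Int) (hN : 1 ≤ N) (hM : 1 ≤ M) :
    poster_perimeter N M K = poster_perimeter_alt N M K := by
  unfold poster_perimeter
  rw [doubleLoop_eq_flat]
  set grid := (PySem.List.pyRange 1 (N+1) 1).flatMap
      (fun L => (PySem.List.pyRange 1 (M+1) 1).map (fun W => |2*(L+W) - K|)) with hgrid
  have mem_grid : ∀ (L W : Int), 1 ≤ L → L ≤ N → 1 ≤ W → W ≤ M → |2*(L+W) - K| ∈ grid := by
    intro L W h1 h2 h3 h4
    rw [hgrid]
    simp only [List.mem_flatMap, List.mem_map]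
    refine ⟨L, ?_, W, ?_, rfl⟩ <;> rw [PySem.List.mem_pyRange_one] <;> omega
  have grid_mem : ∀ y ∈ grid, ∃ L W, 1 ≤ L ∧ L ≤ N ∧ 1 ≤ W ∧ W ≤ M ∧ y = |2*(L+W) - K| := by
    intro y hy
    rw [hgrid] at hy
    simp only [List.mem_flatMap, List.mem_map] at hy
    obtain ⟨L, hL, W, hW, hyv⟩ := hy
    rw [PySem.List.mem_pyRange_one] at hL hW
    exact ⟨L, W, by omega, by omega, by omega, by omega, hyv.symm⟩
  -- B's value is a lower bound of every grid element
  have hlb : ∀ y ∈ grid, poster_perimeter_alt N M K ≤ y := by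
    intro y hy
    obtain ⟨L, W, h1, h2, h3, h4, rfl⟩ := grid_mem y hy
    unfold poster_perimeter_alt
    dsimp only
    split_ifs with hk1 hk2
    · rcases abs_cases (2*(L+W) - K) with ⟨he, _⟩ | ⟨he, _⟩ <;> omega
    · rcases abs_cases (2*(L+W) - K) with ⟨he, _⟩ | ⟨he, _⟩ <;> omega
    · rw [PySem.Int.mod_eq_emod_of_pos (by omega : (0:Int) < 2)]
      rcases abs_cases (2*(L+W) - K) with ⟨he, _⟩ | ⟨he, _⟩ <;> omega
  -- B's value is attained by some grid element
  have hmem : poster_perimeter_alt N M K ∈ grid := by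
    unfold poster_perimeter_alt
    dsimp only
    split_ifs with hk1 hk2
    · have h := mem_grid 1 1 (by omega) hN (by omega) hM
      have : |2*((1:Int)+1) - K| = 4 - K := by
        rcases abs_cases (2*((1:Int)+1) - K) with ⟨he, _⟩ | ⟨he, _⟩ <;> omega
      rwa [this] at h
    · have h := mem_grid N M (by omega) le_rfl (by omega) le_rfl
      have : |2*(N+M) - K| = K - 2*(N+M) := by
        rcases abs_cases (2*(N+M) - K) with ⟨he, _⟩ | ⟨he, _⟩ <;> omega
      rwa [this] at h
    · rw [PySem.Int.mod_eq_emod_of_pos (by omega : (0:Int) < 2)]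
      rcases Int.even_or_odd K with ⟨t, ht⟩ | ⟨t, ht⟩
      · have h := mem_grid (max 1 (t - M)) (t - max 1 (t - M)) (le_max_left _ _)
          (by omega) (by omega) (by omega)
        have hv : |2*(max 1 (t - M) + (t - max 1 (t - M))) - K| = K % 2 := by
          have : max 1 (t - M) + (t - max 1 (t - M)) = t := by omega
          rw [this]
          rcases abs_cases (2*t - K) with ⟨he, _⟩ | ⟨he, _⟩ <;> omega
        rwa [hv] at h
      · have h := mem_grid (max 1 (t + 1 - M)) (t + 1 - max 1 (t + 1 - M)) (le_max_left _ _)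
          (by omega) (by omega) (by omega)
        have hv : |2*(max 1 (t + 1 - M) + (t + 1 - max 1 (t + 1 - M))) - K| = K % 2 := by
          have : max 1 (t + 1 - M) + (t + 1 - max 1 (t + 1 - M)) = t + 1 := by omega
          rw [this]
          rcases abs_cases (2*(t+1) - K) with ⟨he, _⟩ | ⟨he, _⟩ <;> omega
        rwa [hv] at h
  -- the fold computes the minimum of the (nonempty) grid
  cases hg : grid with
  | nil => rw [hg] at hmem; cases hmem
  | cons g gs =>
    simp only [List.foldl_cons]
    have h0 : pyMinOpt none g = some g := rfl
    rw [h0, foldl_pyMinOpt_some, Option.getD_some]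
    rw [hg] at hmem hlb
    refine le_antisymm ?_ ?_
    · rcases List.mem_cons.mp hmem with rfl | h
      · exact foldl_min_le_init _ _
      · exact foldl_min_le_mem _ _ _ h
    · rcases foldl_min_mem gs g with h | h
      · rw [h]; exact hlb g List.mem_cons_self
      · exact hlb _ (List.mem_cons_of_mem _ h)

-- ===== VERDICT (by name: the statement is the Claim_ definition above) =====
theorem poster_perimeter_spec : Claim_equal_poster_perimeter := by
  intro N M K _ hpre
  exact poster_perimeter_eq_alt N M K hpre.1 hpre.2
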